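-- pv_equiv track=rewrite | github.com/xolotl15/word_search_generator | word_search.py | insert_word
-- ===== SOURCE A (Python) =====
-- def insert_word( word: str , i:int , j:int , direction:int , row:int , column:int , matrix:list ):
--     # to avoid writing the same word in different directions, create a copy of the original matrix
--     matrix_temp = [row_temp.copy() for row_temp in matrix.copy()]
--
--     # loop for every letter of the word
--     for letter in word.upper():
--
--         # condition to avoid writing a word over another or to crossing boundaries of the matrix
--         # raise an error to recall insert_word function and try another direction
--         if ( (row > i and i >= 0) and (column > j and j >= 0) ) and (matrix_temp[i][j] == '-' or matrix_temp[i][j] == letter):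
--             matrix_temp[i][j] = letter
--         else:
--             raise(RuntimeError)
--
--         if direction in (3,4,5):
--             i += 1
--         elif direction in (1,7,8):
--             i -= 1
--
--         if direction in (1,2,3):
--             j += 1
--         elif direction in (5,6,7):
--             j -= 1
--     return matrix_temp
-- ===== SOURCE B (Python) =====
-- def insert_word(word, i, j, direction, row, column, matrix):
--     # plan-then-write: compute a step vector, validate all cells in one pass
--     # recording planned writes in a dict, then build the result by comprehension
--     di = 1 if direction in (3, 4, 5) else (-1 if direction in (1, 7, 8) else 0)
--     dj = 1 if direction in (1, 2, 3) else (-1 if direction in (5, 6, 7) else 0)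
--     target = {}
--     for k, letter in enumerate(word.upper()):
--         r, c = i + k * di, j + k * dj
--         if not (0 <= r < row and 0 <= c < column):
--             raise RuntimeError
--         cell = target.get((r, c), matrix[r][c])
--         if cell != '-' and cell != letter:
--             raise RuntimeError
--         target[(r, c)] = letter
--     return [[target.get((r, c), cell) for c, cell in enumerate(rw)]
--             for r, rw in enumerate(matrix)]
-- ===== Notes on version B (the rewrite author's own statement) =====
-- stated objective: alternative
-- what changed: A mutates a matrix copy cell-by-cell while stepping i,j per iteration; B computes a closed-form step vector, validates and plans all writes in one pass into a dict keyed by position, then builds the result matrix by a comprehension (no in-place mutation). Pre_ excludes only inputs where A raises (RuntimeError on out-of-bounds/conflicting cells, IndexError on a matrix smaller than row x column); B raises on exactly those inputs too.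
import Mathlib
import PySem

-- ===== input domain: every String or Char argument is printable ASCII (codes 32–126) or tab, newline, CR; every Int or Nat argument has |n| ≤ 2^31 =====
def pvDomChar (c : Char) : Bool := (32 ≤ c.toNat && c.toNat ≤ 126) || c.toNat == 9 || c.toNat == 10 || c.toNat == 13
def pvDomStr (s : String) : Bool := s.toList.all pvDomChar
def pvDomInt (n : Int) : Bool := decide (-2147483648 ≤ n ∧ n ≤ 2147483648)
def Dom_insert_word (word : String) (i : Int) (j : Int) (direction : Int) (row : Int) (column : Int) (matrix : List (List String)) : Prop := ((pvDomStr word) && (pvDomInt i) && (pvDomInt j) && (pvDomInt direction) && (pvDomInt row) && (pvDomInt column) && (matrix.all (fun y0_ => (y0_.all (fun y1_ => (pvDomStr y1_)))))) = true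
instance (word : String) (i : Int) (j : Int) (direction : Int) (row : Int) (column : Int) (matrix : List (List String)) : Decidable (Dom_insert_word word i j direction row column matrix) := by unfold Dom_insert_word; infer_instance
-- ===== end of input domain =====

-- B is an alternative decomposition: plan-then-write with a closed-form step vector instead of
-- A's cell-by-cell mutation of a matrix copy while stepping (i, j).
-- Neither implementation mutates its arguments; a Python raise is modelled as `none` inside the
-- ports, and the wrappers' values on `none` are only reached outside Pre_insert_word.

-- ===== PORT A =====
-- the loop of A: current position (i, j), current working matrix m; `none` models a raise
-- (RuntimeError on the failed check, IndexError via pyGet? = none, propagated by Option.bind)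
def insertA_go : List Char → Int → Int → Int → Int → Int → List (List String) → Option (List (List String))
  | [], _i, _j, _direction, _row, _column, m => some m
  | ch :: rest, i, j, direction, row, column, m =>
    if (row > i ∧ i ≥ 0) ∧ (column > j ∧ j ≥ 0) then
      (PySem.List.pyGet? m i).bind fun rw =>
        (PySem.List.pyGet? rw j).bind fun cell =>
          if cell = "-" ∨ cell = String.ofList [ch] then
            insertA_go rest
              (if direction = 3 ∨ direction = 4 ∨ direction = 5 then i + 1
               else if direction = 1 ∨ direction = 7 ∨ direction = 8 then i - 1 else i)
              (if direction = 1 ∨ direction = 2 ∨ direction = 3 then j + 1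
               else if direction = 5 ∨ direction = 6 ∨ direction = 7 then j - 1 else j)
              direction row column (m.set i.toNat (rw.set j.toNat (String.ofList [ch])))
          else none                -- raise RuntimeError (cell conflict)
    else none                      -- raise RuntimeError (out of the stated bounds)

def insert_word (word : String) (i : Int) (j : Int) (direction : Int) (row : Int) (column : Int) (matrix : List (List String)) : List (List String) :=
  (insertA_go (PySem.Str.upper word).toList i j direction row column matrix).getD []

-- ===== PORT B =====
def stepI (direction : Int) : Int :=
  if direction = 3 ∨ direction = 4 ∨ direction = 5 then 1
  else if direction = 1 ∨ direction = 7 ∨ direction = 8 then -1 else 0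

def stepJ (direction : Int) : Int :=
  if direction = 1 ∨ direction = 2 ∨ direction = 3 then 1
  else if direction = 5 ∨ direction = 6 ∨ direction = 7 then -1 else 0

-- matrix[r][c] as an Option (none = IndexError)
def cellAt (matrix : List (List String)) (r c : Int) : Option String :=
  (PySem.List.pyGet? matrix r).bind fun rw => PySem.List.pyGet? rw c

-- the validation/planning loop of B: k is the enumerate counter, target the dict of planned writes
def planB : List Char → Int → Int → Int → Int → Int → Int → Int → List (List String) →
    PySem.Dict (Int × Int) String → Option (PySem.Dict (Int × Int) String)
  | [], _k, _i, _j, _di, _dj, _row, _column, _matrix, target => some target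
  | ch :: rest, k, i, j, di, dj, row, column, matrix, target =>
    if 0 ≤ i + k * di ∧ i + k * di < row ∧ 0 ≤ j + k * dj ∧ j + k * dj < column then
      (cellAt matrix (i + k * di) (j + k * dj)).bind fun mcell =>
        if target.getD (i + k * di, j + k * dj) mcell = "-" ∨
           target.getD (i + k * di, j + k * dj) mcell = String.ofList [ch] then
          planB rest (k + 1) i j di dj row column matrix
            (target.insert (i + k * di, j + k * dj) (String.ofList [ch]))
        else none                  -- raise RuntimeError (cell conflict)
    else none                      -- raise RuntimeError (out of the stated bounds)

-- the final comprehension of B: every cell from the plan, or the original cell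
def renderB (matrix : List (List String)) (target : PySem.Dict (Int × Int) String) : List (List String) :=
  (PySem.List.enumerate matrix).map fun p =>
    (PySem.List.enumerate p.2).map fun q => target.getD (p.1, q.1) q.2

def insert_word_alt (word : String) (i : Int) (j : Int) (direction : Int) (row : Int) (column : Int) (matrix : List (List String)) : List (List String) :=
  match planB (PySem.Str.upper word).toList 0 i j (stepI direction) (stepJ direction) row column matrix PySem.Dict.empty with
  | some target => renderB matrix target
  | none => matrix

-- ===== PRECONDITION & SPEC =====
-- the cell A's check compares at step k: the original matrix cell, except that on a degenerate
-- direction (zero step vector) every step after the first sees the letter written just before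
def effCell (W : List Char) (i j di dj : Int) (matrix : List (List String)) (k : Nat) : String :=
  if 0 < k ∧ di = 0 ∧ dj = 0 then String.ofList [W.getD (k - 1) ' ']
  else (cellAt matrix (i + (k : Int) * di) (j + (k : Int) * dj)).getD ""

-- Pre_ excludes exactly the inputs on which A raises: RuntimeError when some step of the word's
-- path leaves the stated bounds or meets a conflicting cell, IndexError when the path leaves the
-- actual matrix although inside the stated bounds.
def Pre_insert_word (word : String) (i : Int) (j : Int) (direction : Int) (row : Int) (column : Int) (matrix : List (List String)) : Prop :=
  ∀ k ∈ List.range (PySem.Str.upper word).toList.length,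
    0 ≤ i + (k : Int) * stepI direction ∧ i + (k : Int) * stepI direction < row ∧
    0 ≤ j + (k : Int) * stepJ direction ∧ j + (k : Int) * stepJ direction < column ∧
    (cellAt matrix (i + (k : Int) * stepI direction) (j + (k : Int) * stepJ direction)).isSome = true ∧
    (effCell (PySem.Str.upper word).toList i j (stepI direction) (stepJ direction) matrix k = "-" ∨
     effCell (PySem.Str.upper word).toList i j (stepI direction) (stepJ direction) matrix k =
       String.ofList [(PySem.Str.upper word).toList.getD k ' '])

instance (word : String) (i : Int) (j : Int) (direction : Int) (row : Int) (column : Int) (matrix : List (List String)) : Decidable (Pre_insert_word word i j direction row column matrix) := by unfold Pre_insert_word; infer_instance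

def pvWitness_insert_word : String × Int × Int × Int × Int × Int × List (List String) :=
  ("ab", 0, 0, 2, 1, 2, [["-", "-"]])

def Spec_insert_word (word : String) (i : Int) (j : Int) (direction : Int) (row : Int) (column : Int) (matrix : List (List String)) (out : List (List String)) : Prop := out = insert_word_alt word i j direction row column matrix
instance (word : String) (i : Int) (j : Int) (direction : Int) (row : Int) (column : Int) (matrix : List (List String)) (out : List (List String)) : Decidable (Spec_insert_word word i j direction row column matrix out) := by unfold Spec_insert_word; infer_instance

-- ===== CLAIM (what is proved, stated in full; the proofs are below) =====
def Claim_equal_insert_word : Prop := ∀ (word : String) (i : Int) (j : Int) (direction : Int) (row : Int) (column : Int) (matrix : List (List String)), Dom_insert_word word i j direction row column matrix → Pre_insert_word word i j direction row column matrix → Spec_insert_word word i j direction row column matrix (insert_word word i j direction row column matrix)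

-- ===== LEMMAS AND PROOFS =====

lemma optBind_some {α β : Type} (a : α) (f : α → Option β) : (some a).bind f = f a := rfl

lemma pyGet?_map {α β : Type} (f : α → β) (l : List α) (i : Int) :
    PySem.List.pyGet? (l.map f) i = (PySem.List.pyGet? l i).map f := by
  simp [PySem.List.pyGet?]

lemma length_enumerate' {α : Type} (l : List α) (s : Int) :
    (PySem.List.enumerate l s).length = l.length := by
  induction l generalizing s with
  | nil => simp [PySem.List.enumerate]
  | cons x xs ih => simp [PySem.List.enumerate, ih]

lemma renderB_pyGet? (matrix : List (List String)) (target : PySem.Dict (Int × Int) String)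
    (r : Int) (hr : 0 ≤ r) :
    PySem.List.pyGet? (renderB matrix target) r =
      (PySem.List.pyGet? matrix r).map
        (fun rw => (PySem.List.enumerate rw).map fun q => target.getD (r, q.1) q.2) := by
  unfold renderB
  rw [show PySem.List.enumerate matrix = PySem.List.enumerate matrix 0 from rfl]
  rw [pyGet?_map, PySem.List.pyGet?_of_nonneg _ hr, PySem.List.pyGet?_of_nonneg _ hr,
      PySem.List.getElem?_enumerate]
  cases h : matrix[r.toNat]? with
  | none => simp
  | some rw => simp [Int.toNat_of_nonneg hr]

lemma row_pyGet? (rw : List String) (target : PySem.Dict (Int × Int) String) (r c : Int) (hc : 0 ≤ c) :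
    PySem.List.pyGet? ((PySem.List.enumerate rw).map fun q => target.getD (r, q.1) q.2) c =
      (PySem.List.pyGet? rw c).map fun cell => target.getD (r, c) cell := by
  rw [show PySem.List.enumerate rw = PySem.List.enumerate rw 0 from rfl]
  rw [pyGet?_map, PySem.List.pyGet?_of_nonneg _ hc, PySem.List.pyGet?_of_nonneg _ hc,
      PySem.List.getElem?_enumerate]
  cases h : rw[c.toNat]? with
  | none => simp
  | some cell => simp [Int.toNat_of_nonneg hc]

lemma renderB_empty (matrix : List (List String)) :
    renderB matrix (PySem.Dict.empty : PySem.Dict (Int × Int) String) = matrix := by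
  unfold renderB
  calc (PySem.List.enumerate matrix).map
        (fun p => (PySem.List.enumerate p.2).map fun q => (PySem.Dict.empty : PySem.Dict (Int × Int) String).getD (p.1, q.1) q.2)
      = (PySem.List.enumerate matrix).map (fun p => p.2) := by
        apply List.map_congr_left; intro p _
        simp [PySem.Dict.getD_empty, PySem.List.map_snd_enumerate]
    _ = matrix := PySem.List.map_snd_enumerate matrix 0

lemma renderB_insert (matrix : List (List String)) (target : PySem.Dict (Int × Int) String)
    (r c : Int) (hr : 0 ≤ r) (hc : 0 ≤ c) (rw : List String)
    (hrw : PySem.List.pyGet? matrix r = some rw) (letter : String) :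
    renderB matrix (target.insert (r, c) letter) =
      (renderB matrix target).set r.toNat
        (((PySem.List.enumerate rw).map fun q => target.getD (r, q.1) q.2).set c.toNat letter) := by
  rw [PySem.List.pyGet?_of_nonneg _ hr] at hrw
  have hlen : r.toNat < matrix.length := by
    by_contra hcon
    push_neg at hcon
    rw [List.getElem?_eq_none hcon] at hrw
    cases hrw
  apply List.ext_getElem?
  intro n
  rw [List.getElem?_set]
  unfold renderB
  rw [show PySem.List.enumerate matrix = PySem.List.enumerate matrix 0 from rfl]
  simp only [List.getElem?_map, PySem.List.getElem?_enumerate, Option.map_map,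
    List.length_map, length_enumerate', zero_add]
  by_cases hn : r.toNat = n
  · subst hn
    rw [if_pos rfl, if_pos hlen, hrw]
    simp only [Option.map_some, Int.toNat_of_nonneg hr]
    congr 1
    apply List.ext_getElem?
    intro t
    rw [List.getElem?_set]
    rw [show PySem.List.enumerate rw = PySem.List.enumerate rw 0 from rfl]
    simp only [List.getElem?_map, PySem.List.getElem?_enumerate, Option.map_map,
      List.length_map, length_enumerate', Function.comp, zero_add]
    by_cases ht : c.toNat = t
    · subst ht
      rw [if_pos rfl]
      by_cases htl : c.toNat < rw.length
      · rw [if_pos htl, List.getElem?_eq_getElem htl]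
        simp only [Option.map_some, Function.comp_apply, Int.toNat_of_nonneg hc]
        rw [PySem.Dict.getD_insert, if_pos rfl]
      · rw [if_neg htl, List.getElem?_eq_none (by omega)]
        simp
    · rw [if_neg ht]
      cases hcell : rw[t]? with
      | none => simp
      | some cell =>
        simp only [Option.map_some, Function.comp_apply]
        have hne : (((r, (t : Int)) : Int × Int)) ≠ (r, c) := by
          intro heq
          rw [Prod.mk.injEq] at heq
          exact ht (by omega)
        rw [PySem.Dict.getD_insert, if_neg hne]
  · rw [if_neg hn]
    cases hm : matrix[n]? with
    | none => simp
    | some mrow =>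
      simp only [Option.map_some]
      congr 1
      apply List.map_congr_left
      intro q _
      have hne : ((((n : Int), q.1) : Int × Int)) ≠ (r, c) := by
        intro heq
        rw [Prod.mk.injEq] at heq
        exact hn (by omega)
      rw [PySem.Dict.getD_insert, if_neg hne]

lemma go_eq (direction row column : Int) (matrix : List (List String)) :
    ∀ (chars : List Char) (k i j : Int) (target : PySem.Dict (Int × Int) String),
    insertA_go chars (i + k * stepI direction) (j + k * stepJ direction) direction row column
        (renderB matrix target)
      = (planB chars k i j (stepI direction) (stepJ direction) row column matrix target).map
          (renderB matrix) := by
  intro chars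
  induction chars with
  | nil => intro k i j target; simp [insertA_go, planB]
  | cons ch rest ih =>
    intro k i j target
    simp only [insertA_go, planB]
    by_cases hb : 0 ≤ i + k * stepI direction ∧ i + k * stepI direction < row ∧
        0 ≤ j + k * stepJ direction ∧ j + k * stepJ direction < column
    · obtain ⟨hr', hrow, hc', hcol⟩ := hb
      have hbA : (row > i + k * stepI direction ∧ i + k * stepI direction ≥ 0) ∧
          (column > j + k * stepJ direction ∧ j + k * stepJ direction ≥ 0) :=
        ⟨⟨hrow, hr'⟩, hcol, hc'⟩
      have hbB : 0 ≤ i + k * stepI direction ∧ i + k * stepI direction < row ∧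
          0 ≤ j + k * stepJ direction ∧ j + k * stepJ direction < column :=
        ⟨hr', hrow, hc', hcol⟩
      rw [if_pos hbA, if_pos hbB]
      rw [renderB_pyGet? matrix target _ hr']
      simp only [cellAt]
      cases hm : PySem.List.pyGet? matrix (i + k * stepI direction) with
      | none => simp
      | some rw' =>
        simp only [Option.map_some, optBind_some]
        rw [row_pyGet? rw' target _ _ hc']
        cases hcell : PySem.List.pyGet? rw' (j + k * stepJ direction) with
        | none => simp
        | some mcell =>
          simp only [Option.map_some, optBind_some]
          by_cases hok : target.getD (i + k * stepI direction, j + k * stepJ direction) mcell = "-" ∨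
              target.getD (i + k * stepI direction, j + k * stepJ direction) mcell = String.ofList [ch]
          · rw [if_pos hok, if_pos hok]
            rw [← renderB_insert matrix target _ _ hr' hc' rw' hm (String.ofList [ch])]
            have hi : (if direction = 3 ∨ direction = 4 ∨ direction = 5 then i + k * stepI direction + 1
                 else if direction = 1 ∨ direction = 7 ∨ direction = 8 then i + k * stepI direction - 1
                 else i + k * stepI direction) = i + (k + 1) * stepI direction := by
              unfold stepI; split_ifs <;> ring
            have hj : (if direction = 1 ∨ direction = 2 ∨ direction = 3 then j + k * stepJ direction + 1
                 else if direction = 5 ∨ direction = 6 ∨ direction = 7 then j + k * stepJ direction - 1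
                 else j + k * stepJ direction) = j + (k + 1) * stepJ direction := by
              unfold stepJ; split_ifs <;> ring
            rw [hi, hj]
            exact ih (k + 1) i j
              (target.insert (i + k * stepI direction, j + k * stepJ direction) (String.ofList [ch]))
          · rw [if_neg hok, if_neg hok]
            simp
    · rw [if_neg (by tauto), if_neg hb]
      simp

lemma plan_isSome (W : List Char) (i j di dj row column : Int) (matrix : List (List String))
    (hP : ∀ k ∈ List.range W.length,
      0 ≤ i + (k : Int) * di ∧ i + (k : Int) * di < row ∧
      0 ≤ j + (k : Int) * dj ∧ j + (k : Int) * dj < column ∧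
      (cellAt matrix (i + (k : Int) * di) (j + (k : Int) * dj)).isSome = true ∧
      (effCell W i j di dj matrix k = "-" ∨ effCell W i j di dj matrix k = String.ofList [W.getD k ' '])) :
    ∀ (rest : List Char) (kk : Nat) (target : PySem.Dict (Int × Int) String),
      rest = W.drop kk →
      (¬(di = 0 ∧ dj = 0) → ∀ t : Nat, kk ≤ t → target.get? (i + (t : Int) * di, j + (t : Int) * dj) = none) →
      ((di = 0 ∧ dj = 0) → (kk = 0 → target.get? (i, j) = none) ∧
          (0 < kk → target.get? (i, j) = some (String.ofList [W.getD (kk - 1) ' ']))) →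
      (planB rest (kk : Int) i j di dj row column matrix target).isSome = true := by
  intro rest
  induction rest with
  | nil => intro kk target _ _ _; simp [planB]
  | cons ch rest' ih =>
    intro kk target hdrop hnon hdeg
    have hkk : kk < W.length := by
      by_contra h
      push_neg at h
      rw [List.drop_eq_nil_of_le h] at hdrop
      exact List.cons_ne_nil ch rest' hdrop
    have hch : W[kk]? = some ch := by
      have h0 : (W.drop kk)[0]? = some ch := by rw [← hdrop]; rfl
      rwa [List.getElem?_drop, Nat.add_zero] at h0
    have hgetDch : W.getD kk ' ' = ch := by
      rw [List.getD_eq_getElem?_getD, hch]; rfl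
    have hrest : rest' = W.drop (kk + 1) := by
      have h1 := congrArg (List.drop 1) hdrop
      simpa [List.drop_drop, Nat.add_comm] using h1
    obtain ⟨h1, h2, h3, h4, h5, h6⟩ := hP kk (List.mem_range.mpr hkk)
    simp only [planB]
    have hbB : 0 ≤ i + (kk : Int) * di ∧ i + (kk : Int) * di < row ∧
        0 ≤ j + (kk : Int) * dj ∧ j + (kk : Int) * dj < column := ⟨h1, h2, h3, h4⟩
    rw [if_pos hbB]
    obtain ⟨mcell, hmc⟩ := Option.isSome_iff_exists.mp h5
    rw [hmc]
    simp only [optBind_some]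
    have hgetD : target.getD (i + (kk : Int) * di, j + (kk : Int) * dj) mcell
        = effCell W i j di dj matrix kk := by
      by_cases hdd : di = 0 ∧ dj = 0
      · obtain ⟨e1, e2⟩ := hdd
        subst e1; subst e2
        rw [PySem.Dict.getD_eq_get?_getD]
        simp only [mul_zero, add_zero] at hmc ⊢
        rcases Nat.eq_zero_or_pos kk with h0 | h0
        · rw [(hdeg ⟨rfl, rfl⟩).1 h0]
          unfold effCell
          rw [if_neg (by simp [h0])]
          simp only [mul_zero, add_zero, hmc]
          rfl
        · rw [(hdeg ⟨rfl, rfl⟩).2 h0]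
          unfold effCell
          rw [if_pos ⟨h0, rfl, rfl⟩]
          rfl
      · rw [PySem.Dict.getD_eq_get?_getD, hnon hdd kk le_rfl]
        unfold effCell
        rw [if_neg (by tauto)]
        simp only [hmc]
        rfl
    rw [hgetDch] at h6
    rw [hgetD, if_pos h6]
    rw [show (kk : Int) + 1 = ((kk + 1 : Nat) : Int) by push_cast; ring]
    refine ih (kk + 1) _ hrest ?_ ?_
    · intro hdd t ht
      have hne : ((i + (t : Int) * di, j + (t : Int) * dj) : Int × Int)
          ≠ (i + (kk : Int) * di, j + (kk : Int) * dj) := by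
        intro heq
        rw [Prod.mk.injEq] at heq
        obtain ⟨e1, e2⟩ := heq
        have e1' : (t : Int) * di = (kk : Int) * di := by linarith
        have e2' : (t : Int) * dj = (kk : Int) * dj := by linarith
        rcases not_and_or.mp hdd with hdi | hdj
        · have ht' : (t : Int) = (kk : Int) := mul_right_cancel₀ hdi e1'
          omega
        · have ht' : (t : Int) = (kk : Int) := mul_right_cancel₀ hdj e2'
          omega
      rw [PySem.Dict.get?_insert, if_neg hne]
      exact hnon hdd t (by omega)
    · intro hdd
      obtain ⟨e1, e2⟩ := hdd
      subst e1; subst e2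
      refine ⟨fun h => absurd h (by omega), fun _ => ?_⟩
      simp only [mul_zero, add_zero]
      rw [PySem.Dict.get?_insert_self]
      rw [show kk + 1 - 1 = kk from rfl, hgetDch]

-- ===== VERDICT (by name: the statement is the Claim_ definition above) =====
theorem insert_word_spec : Claim_equal_insert_word := by
  unfold Claim_equal_insert_word
  intro word i j direction row column matrix _hdom hpre
  unfold Spec_insert_word insert_word insert_word_alt
  unfold Pre_insert_word at hpre
  have hgo := go_eq direction row column matrix (PySem.Str.upper word).toList 0 i j PySem.Dict.empty
  rw [renderB_empty] at hgo
  simp only [zero_mul, add_zero] at hgo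
  have hsome := plan_isSome (PySem.Str.upper word).toList i j (stepI direction) (stepJ direction)
      row column matrix hpre (PySem.Str.upper word).toList 0 PySem.Dict.empty (by simp)
      (fun _ t _ => PySem.Dict.get?_empty _)
      (fun _ => ⟨fun _ => PySem.Dict.get?_empty _, fun h => absurd h (by omega)⟩)
  simp only [Nat.cast_zero] at hsome
  cases hplan : planB (PySem.Str.upper word).toList 0 i j (stepI direction) (stepJ direction) row
      column matrix PySem.Dict.empty with
  | none => rw [hplan] at hsome; simp at hsome
  | some t =>
    rw [hplan] at hgo
    simp only [Option.map_some] at hgo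
    rw [hgo]
    simp
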